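-- pv_equiv track=rewrite | github.com/huseyinsrkya/test-case | python-task/python.py | tek_cift_ayir
-- ===== SOURCE A (Python) =====
-- def tek_cift_ayir(liste):
--     tek_sayilar = []
--     cift_sayilar = []
--
--     for sayi in liste:
--         if sayi % 2 == 0:
--             cift_sayilar.append(sayi)
--         else:
--             tek_sayilar.append(sayi)
--
--     if not tek_sayilar:
--         en_buyuk_tek = None
--     else:
--         en_buyuk_tek = max(tek_sayilar)
--
--     if not cift_sayilar:
--         en_kucuk_cift = None
--     else:
--         en_kucuk_cift = min(cift_sayilar)
--
--     return en_buyuk_tek, en_kucuk_cift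
-- ===== SOURCE B (Python) =====
-- def tek_cift_ayir(liste):
--     en_buyuk_tek = None
--     en_kucuk_cift = None
--     for sayi in liste:
--         if sayi % 2 == 0:
--             if en_kucuk_cift is None or sayi < en_kucuk_cift:
--                 en_kucuk_cift = sayi
--         else:
--             if en_buyuk_tek is None or sayi > en_buyuk_tek:
--                 en_buyuk_tek = sayi
--     return en_buyuk_tek, en_kucuk_cift
-- ===== Notes on version B (the rewrite author's own statement) =====
-- stated objective: simpler
-- what changed: Replaces the build-two-lists-then-max/min three-pass structure with a single pass that maintains the running odd-maximum and even-minimum in two Option variables.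
import Mathlib
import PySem

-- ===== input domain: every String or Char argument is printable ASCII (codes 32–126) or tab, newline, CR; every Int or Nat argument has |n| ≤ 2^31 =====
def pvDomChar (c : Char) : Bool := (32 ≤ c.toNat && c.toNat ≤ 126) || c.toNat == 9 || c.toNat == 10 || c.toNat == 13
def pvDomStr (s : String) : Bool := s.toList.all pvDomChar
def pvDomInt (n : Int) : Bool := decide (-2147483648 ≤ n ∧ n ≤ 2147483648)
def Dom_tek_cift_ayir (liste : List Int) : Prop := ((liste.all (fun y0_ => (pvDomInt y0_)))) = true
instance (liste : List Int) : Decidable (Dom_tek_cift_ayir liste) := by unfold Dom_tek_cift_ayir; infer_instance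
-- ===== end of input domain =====

-- B replaces A's two accumulator lists + max/min passes with one pass keeping running extrema (simpler, O(1) extra space).

-- ===== PORT A =====
-- A: partition liste into odd/even lists, then max of odds / min of evens (None when empty).
def tek_cift_ayir (liste : List Int) : Option Int × Option Int :=
  let p := liste.foldl
    (fun (acc : List Int × List Int) sayi =>
      if PySem.Int.mod sayi 2 = 0 then (acc.1, acc.2 ++ [sayi]) else (acc.1 ++ [sayi], acc.2))
    ([], [])
  let en_buyuk_tek : Option Int := if p.1 = [] then none else PySem.List.max? p.1 (fun x => x)
  let en_kucuk_cift : Option Int := if p.2 = [] then none else PySem.List.min? p.2 (fun x => x)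
  (en_buyuk_tek, en_kucuk_cift)

-- ===== PORT B =====
-- B: one loop, two Option accumulators for the running odd-max and even-min.
def tek_cift_ayir_alt (liste : List Int) : Option Int × Option Int :=
  liste.foldl
    (fun (acc : Option Int × Option Int) sayi =>
      if PySem.Int.mod sayi 2 = 0 then
        (acc.1,
         match acc.2 with
         | none => some sayi
         | some m => if sayi < m then some sayi else some m)
      else
        (match acc.1 with
         | none => some sayi
         | some m => if sayi > m then some sayi else some m,
         acc.2))
    (none, none)

-- ===== PRECONDITION & SPEC =====
def Spec_tek_cift_ayir (liste : List Int) (out : Option Int × Option Int) : Prop := out = tek_cift_ayir_alt liste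
instance (liste : List Int) (out : Option Int × Option Int) : Decidable (Spec_tek_cift_ayir liste out) := by unfold Spec_tek_cift_ayir; infer_instance

-- ===== CLAIM (what is proved, stated in full; the proofs are below) =====
def Claim_equal_tek_cift_ayir : Prop := ∀ (liste : List Int), Dom_tek_cift_ayir liste → Spec_tek_cift_ayir liste (tek_cift_ayir liste)

-- ===== LEMMAS AND PROOFS =====

-- A's partition fold, starting from (a, b), appends the "else"-filter / "then"-filter (generic predicate
-- so that simp cannot normalise the parity test away from the induction hypothesis).
theorem foldA_eq (p : Int → Prop) [DecidablePred p] (liste : List Int) (a b : List Int) :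
    liste.foldl
      (fun (acc : List Int × List Int) sayi =>
        if p sayi then (acc.1, acc.2 ++ [sayi]) else (acc.1 ++ [sayi], acc.2))
      (a, b)
    = (a ++ liste.filter (fun x => decide (¬ p x)),
       b ++ liste.filter (fun x => decide (p x))) := by
  induction liste generalizing a b with
  | nil => simp
  | cons x t ih =>
    simp only [List.foldl_cons]
    by_cases h : p x
    · rw [if_pos h, ih]; simp [h]
    · rw [if_neg h, ih]; simp [h]

-- B's running-max step, iterated from a some-accumulator, is foldl max.
theorem omax_some (t : List Int) (m : Int) :
    t.foldl (fun (a : Option Int) x =>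
      match a with
      | none => some x
      | some m => if x > m then some x else some m) (some m)
    = some (t.foldl max m) := by
  induction t generalizing m with
  | nil => rfl
  | cons y s ih =>
    show List.foldl _ (if y > m then some y else some m) s = _
    by_cases hy : y > m
    · rw [if_pos hy, ih]
      show _ = some (s.foldl max (max m y))
      rw [max_eq_right hy.le]
    · rw [if_neg hy, ih]
      show _ = some (s.foldl max (max m y))
      rw [max_eq_left (not_lt.mp hy)]

theorem omin_some (t : List Int) (m : Int) :
    t.foldl (fun (a : Option Int) x =>
      match a with
      | none => some x
      | some m => if x < m then some x else some m) (some m)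
    = some (t.foldl min m) := by
  induction t generalizing m with
  | nil => rfl
  | cons y s ih =>
    show List.foldl _ (if y < m then some y else some m) s = _
    by_cases hy : y < m
    · rw [if_pos hy, ih]
      show _ = some (s.foldl min (min m y))
      rw [min_eq_right hy.le]
    · rw [if_neg hy, ih]
      show _ = some (s.foldl min (min m y))
      rw [min_eq_left (not_lt.mp hy)]

-- B's fold, from any pair of Option accumulators, processes the two filters independently.
theorem foldB_eq (p : Int → Prop) [DecidablePred p] (liste : List Int) (ot oc : Option Int) :
    liste.foldl
      (fun (acc : Option Int × Option Int) sayi =>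
        if p sayi then
          (acc.1,
           match acc.2 with
           | none => some sayi
           | some m => if sayi < m then some sayi else some m)
        else
          (match acc.1 with
           | none => some sayi
           | some m => if sayi > m then some sayi else some m,
           acc.2))
      (ot, oc)
    = ((liste.filter (fun x => decide (¬ p x))).foldl
         (fun (a : Option Int) x =>
           match a with
           | none => some x
           | some m => if x > m then some x else some m) ot,
       (liste.filter (fun x => decide (p x))).foldl
         (fun (a : Option Int) x =>
           match a with
           | none => some x
           | some m => if x < m then some x else some m) oc) := by
  induction liste generalizing ot oc with
  | nil => rfl
  | cons x t ih =>
    simp only [List.foldl_cons]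
    by_cases h : p x
    · rw [if_pos h, ih]; simp [h]
    · rw [if_neg h, ih]; simp [h]

-- ===== VERDICT (by name: the statement is the Claim_ definition above) =====
theorem tek_cift_ayir_spec : Claim_equal_tek_cift_ayir := by
  intro liste _
  unfold Spec_tek_cift_ayir tek_cift_ayir tek_cift_ayir_alt
  rw [foldA_eq (fun s => PySem.Int.mod s 2 = 0), foldB_eq (fun s => PySem.Int.mod s 2 = 0)]
  simp only [List.nil_append, Prod.mk.injEq]
  constructor
  · cases h : liste.filter (fun x => decide (¬ PySem.Int.mod x 2 = 0)) with
    | nil => simp [h]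
    | cons y s =>
      simp only [List.foldl_cons]
      rw [omax_some, PySem.List.max?_id_cons]
      simp
  · cases h : liste.filter (fun x => decide (PySem.Int.mod x 2 = 0)) with
    | nil => simp [h]
    | cons y s =>
      simp only [List.foldl_cons]
      rw [omin_some, PySem.List.min?_id_cons]
      simp
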